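-- pv_equiv track=rewrite | github.com/Andrevile/Algorithm | BOJ PS/신입 사원.py | result
-- ===== SOURCE A (Python) =====
-- def result(inputlist):
--     choose=1
--     in_num=inputlist[0][1]
--     for case in inputlist[1:]:
--         if in_num>case[1]:
--             choose+=1
--             in_num=case[1]
--     return choose
-- ===== SOURCE B (Python) =====
-- def result(inputlist):
--     # Phase 1: materialize the running-minimum table of the second components
--     # (inputlist[0][1] raises IndexError on an empty list, like A).
--     m = inputlist[0][1]
--     mins = []
--     for c in inputlist:
--         m = min(m, c[1])
--         mins.append(m)
--     # Phase 2: 1 + number of strict descents in the running-minimum table.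
--     return 1 + sum(1 for prev, cur in zip(mins, mins[1:]) if cur < prev)
-- ===== Notes on version B (the rewrite author's own statement) =====
-- stated objective: alternative
-- what changed: Replaces A's fused single pass (running min + conditional counter in one loop) by a two-phase computation: first materialize the prefix-minimum table, then count strict descents between adjacent entries of that table with zip.
import Mathlib
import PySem

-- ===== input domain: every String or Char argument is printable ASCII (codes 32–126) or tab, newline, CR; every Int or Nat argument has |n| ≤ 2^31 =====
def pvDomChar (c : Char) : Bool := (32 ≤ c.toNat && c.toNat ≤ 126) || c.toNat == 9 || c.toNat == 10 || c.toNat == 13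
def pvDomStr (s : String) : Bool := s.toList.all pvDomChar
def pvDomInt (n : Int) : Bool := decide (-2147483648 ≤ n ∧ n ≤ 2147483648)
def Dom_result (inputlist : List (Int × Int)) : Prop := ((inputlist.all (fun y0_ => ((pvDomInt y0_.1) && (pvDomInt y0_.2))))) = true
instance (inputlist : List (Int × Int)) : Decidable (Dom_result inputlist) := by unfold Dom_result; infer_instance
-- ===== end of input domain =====

-- B builds the prefix-minimum table first, then counts strict descents in it; A fuses both into one pass.

-- ===== PORT A =====
-- literal port of A: in_num = inputlist[0][1]; loop over inputlist[1:] updating (choose, in_num)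
def result (inputlist : List (Int × Int)) : Int :=
  match PySem.List.pyGet? inputlist 0 with
  | none => 0  -- IndexError in Python; excluded by Pre_result
  | some x =>
    ((PySem.List.slice inputlist (some 1) none).foldl
      (fun (s : Int × Int) c => if s.2 > c.2 then (s.1 + 1, c.2) else s) (1, x.2)).1

-- ===== PORT B =====
-- literal port of Source B: phase 1 builds mins by appending the running min; phase 2 counts descents via zip
def result_alt (inputlist : List (Int × Int)) : Int :=
  match PySem.List.pyGet? inputlist 0 with
  | none => 0  -- IndexError in Python; excluded by Pre_result
  | some x =>
    let mins := (inputlist.foldl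
      (fun (acc : List Int × Int) c =>
        let m := min acc.2 c.2
        (acc.1 ++ [m], m)) ([], x.2)).1
    1 + (((mins.zip (mins.drop 1)).filter (fun p => decide (p.2 < p.1))).length : Int)

-- ===== PRECONDITION & SPEC =====
-- Pre_: both programs raise IndexError (inputlist[0]) on the empty list.
def Pre_result (inputlist : List (Int × Int)) : Prop := inputlist ≠ []
instance (inputlist : List (Int × Int)) : Decidable (Pre_result inputlist) := by unfold Pre_result; infer_instance
def pvWitness_result : (List (Int × Int)) := [(1, 4), (2, 2), (3, 3)]
def Spec_result (inputlist : List (Int × Int)) (out : Int) : Prop := out = result_alt inputlist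
instance (inputlist : List (Int × Int)) (out : Int) : Decidable (Spec_result inputlist out) := by unfold Spec_result; infer_instance

-- ===== CLAIM (what is proved, stated in full; the proofs are below) =====
def Claim_equal_result : Prop := ∀ (inputlist : List (Int × Int)), Dom_result inputlist → Pre_result inputlist → Spec_result inputlist (result inputlist)

-- ===== LEMMAS AND PROOFS =====

-- the running-minimum sequence of the second components, starting below m
def pvScan (m : Int) : List (Int × Int) → List Int
  | [] => []
  | c :: l => min m c.2 :: pvScan (min m c.2) l

-- number of strict decreases of the running minimum (= A's increments)
def pvDesc (m : Int) : List (Int × Int) → Nat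
  | [] => 0
  | c :: l => (if c.2 < m then 1 else 0) + pvDesc (min m c.2) l

theorem foldA_eq (l : List (Int × Int)) : ∀ (k m : Int),
    (l.foldl (fun (s : Int × Int) c => if s.2 > c.2 then (s.1 + 1, c.2) else s) (k, m)).1
      = k + (pvDesc m l : Int) := by
  induction l with
  | nil => intro k m; simp [pvDesc]
  | cons c l ih =>
    intro k m
    by_cases h : c.2 < m
    · have hm : min m c.2 = c.2 := by omega
      simp [pvDesc, List.foldl, h, show m > c.2 from h, ih, hm]
      push_cast; ring
    · have hm : min m c.2 = m := by omega
      simp [pvDesc, List.foldl, h, show ¬ m > c.2 from h, ih, hm]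

theorem foldB_eq (l : List (Int × Int)) : ∀ (acc : List Int) (m : Int),
    (l.foldl (fun (acc : List Int × Int) c =>
        let m := min acc.2 c.2
        (acc.1 ++ [m], m)) (acc, m)).1 = acc ++ pvScan m l := by
  induction l with
  | nil => intro acc m; simp [pvScan]
  | cons c l ih => intro acc m; simp [pvScan, List.foldl, ih]

-- counting adjacent strict descents in m :: pvScan m l gives pvDesc m l
theorem zipcount_scan (l : List (Int × Int)) : ∀ (m : Int),
    (((m :: pvScan m l).zip (pvScan m l)).filter (fun p => decide (p.2 < p.1))).length
      = pvDesc m l := by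
  induction l with
  | nil => intro m; simp [pvScan, pvDesc]
  | cons c l ih =>
    intro m
    simp only [pvScan, pvDesc, List.zip, List.zipWith, List.filter]
    by_cases h : c.2 < m
    · have hm : min m c.2 < m := by omega
      have hih := ih (min m c.2)
      simp only [List.zip] at hih
      simp [hm, h, hih]
      omega
    · have hm : ¬ min m c.2 < m := by omega
      have hih := ih (min m c.2)
      simp only [List.zip] at hih
      simp [hm, h, hih]

theorem scan_head (c : Int × Int) (l : List (Int × Int)) :
    pvScan c.2 (c :: l) = c.2 :: pvScan c.2 l := by
  simp [pvScan]

-- ===== VERDICT (by name: the statement is the Claim_ definition above) =====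
theorem result_spec : Claim_equal_result := by
  intro inputlist _ hpre
  match inputlist with
  | [] => exact absurd rfl hpre
  | x :: rest =>
    show result (x :: rest) = result_alt (x :: rest)
    have h0 : PySem.List.pyGet? (x :: rest) (0:Int) = some x := by simp [pysem]
    simp only [result, result_alt, h0, PySem.List.slice_from_one, List.tail]
    rw [foldA_eq, foldB_eq]
    simp only [List.nil_append]
    rw [scan_head x rest]
    simp only [List.drop_one, List.tail_cons]
    rw [zipcount_scan]
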